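-- pv_equiv track=rewrite | github.com/iucario/WorkoutDetector | workoutdetector/utils/inference_count.py | pred_to_count
-- ===== SOURCE A (Python) =====
-- from typing import Callable, Deque, Dict, List, Optional, Tuple, Union
--
-- def pred_to_count(preds: List[int], step: int) -> Tuple[int, List[int]]:
--     """Convert a list of predictions to a repetition count.
--
--     Args:
--         preds: list of size total_frames//step in the video. If -1, it means no action.
--         step: step size of the predictions.
--
--     Returns:
--         A tuple of (repetition count,
--         list of preds of action start and end states, e.g. start_1, end_1, start_2, end_2, ...)
--
--     Note:
--         The labels are in order. Because that's how I loaded the data.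
--         E.g. 0 and 1 represent the start and end of the same action.
--         We consider action class as well as state changes.
--         I can ensemble a standalone action recognition model if things don't work well.
--
--     Algorithm:
--         1. If the state changes, and current and previous state are of the same action,
--             and are in order, we count the action. For example, if the state changes from
--             0 to 1, or 2 to 3, aka even to odd, we count the action.
--
--         It means the model has to capture the presice time of state transition.
--         Because the model takes 8 continuous frames as input.
--         Or I doubt it will work well. So multiple time scale should be added.
--
--     Example:
--         >>> preds = [-1, -1, 6, 6, 6, 7, 6, 6, 6, 7, 6, 6, 7, 7, 6, 6, 7, 7, 6, 6, 7, 7, 6, 6, 7, 7, -1]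
--         >>> pred_to_count(preds, step=8)
--         (6, [16, 40, 48, 72, 80, 96, 112, 128, 144, 160, 176, 192])
--     """
--
--     count = 0
--     reps = []  # start_1, end_1, start_2, end_2, ...
--     states: List[int] = []
--     prev_state_start_idx = 0
--     for idx, pred in enumerate(preds):
--         if pred == -1:
--             continue
--         # if state changed and current and previous state are the same action
--         if states and states[-1] != pred:
--             if pred % 2 == 1 and states[-1] == pred - 1:
--                 count += 1
--                 reps.append(prev_state_start_idx * step)
--                 reps.append(idx * step)
--         states.append(pred)
--         prev_state = preds[prev_state_start_idx]
--         if pred != prev_state:  # new state, new start index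
--             prev_state_start_idx = idx
--
--     assert count * 2 == len(reps)
--     return count, reps  # len(rep) * step <= len(frames), last not full queue is discarded
-- ===== SOURCE B (Python) =====
-- def pred_to_count(preds, step):
--     """Run-table re-implementation: build (value, start_idx) runs merging across -1,
--     then count even->odd transitions between consecutive runs."""
--     runs = []  # (value, start index), -1 frames skipped, equal values merge
--     for idx, pred in enumerate(preds):
--         if pred == -1:
--             continue
--         if not runs or runs[-1][0] != pred:
--             runs.append((pred, idx))
--     count = 0
--     reps = []
--     for (pv, pi), (cv, ci) in zip(runs, runs[1:]):
--         if cv % 2 == 1 and pv == cv - 1: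
--             count += 1
--             reps.append(pi * step)
--             reps.append(ci * step)
--     return count, reps
-- ===== Notes on version B (the rewrite author's own statement) =====
-- stated objective: simpler
-- what changed: Replaced A's inline single-pass state machine (growing states list plus prev_state_start_idx bookkeeping and re-indexing into preds) by two plain passes: build a run table of (value, start index) merging across -1 gaps, then scan consecutive run pairs for even-to-odd transitions.
import Mathlib
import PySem

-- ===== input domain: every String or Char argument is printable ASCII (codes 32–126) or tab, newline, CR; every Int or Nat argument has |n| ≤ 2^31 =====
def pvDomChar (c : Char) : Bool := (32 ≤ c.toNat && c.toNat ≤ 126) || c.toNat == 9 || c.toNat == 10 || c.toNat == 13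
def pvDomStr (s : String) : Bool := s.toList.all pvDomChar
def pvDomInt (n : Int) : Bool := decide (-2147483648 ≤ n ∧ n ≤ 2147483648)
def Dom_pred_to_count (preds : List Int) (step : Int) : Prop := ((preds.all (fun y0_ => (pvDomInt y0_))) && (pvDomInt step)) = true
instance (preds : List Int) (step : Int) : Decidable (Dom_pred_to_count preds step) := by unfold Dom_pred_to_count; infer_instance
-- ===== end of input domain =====

-- B replaces A's inline state machine by an explicit run table (value, start index) plus a
-- transition scan over consecutive run pairs; objective: simpler decomposition, same cost.

-- ===== PORT A =====
-- A's `states` list is only read at states[-1]; the port keeps it in REVERSE order (head = last),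
-- which represents the same Python list. `preds[prev_state_start_idx]` always has the index in
-- range in Python, so pyGetD's default 0 is never used. The `assert` always holds and is omitted.
def pvStepA (preds : List Int) (step : Int)
    (s : Int × List Int × List Int × Int) (ip : Int × Int) : Int × List Int × List Int × Int :=
  let count := s.1
  let reps := s.2.1
  let states := s.2.2.1
  let prevStart := s.2.2.2
  let idx := ip.1
  let pred := ip.2
  if pred = -1 then s
  else
    let cr : Int × List Int :=
      if states ≠ [] ∧ states.head? ≠ some pred then
        if PySem.Int.mod pred 2 = 1 ∧ states.head? = some (pred - 1) then
          (count + 1, reps ++ [prevStart * step, idx * step])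
        else (count, reps)
      else (count, reps)
    let prevState := PySem.List.pyGetD preds prevStart 0
    (cr.1, cr.2, pred :: states, if pred ≠ prevState then idx else prevStart)

def pred_to_count (preds : List Int) (step : Int) : Int × List Int :=
  let r := (PySem.List.enumerate preds).foldl (pvStepA preds step) (0, [], [], 0)
  (r.1, r.2.1)

-- ===== PORT B =====
-- first pass: build runs (value, start index), skipping -1 and merging equal values across gaps
def pvStepB (runs : List (Int × Int)) (ip : Int × Int) : List (Int × Int) :=
  if ip.2 = -1 then runs
  else if runs = [] ∨ runs.getLast?.map Prod.fst ≠ some ip.2 then runs ++ [(ip.2, ip.1)]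
  else runs

def pvRuns (preds : List Int) : List (Int × Int) :=
  (PySem.List.enumerate preds).foldl pvStepB []

-- second pass: scan consecutive run pairs for even→odd transitions of the same action
def pvPairStep (step : Int) (acc : Int × List Int) (pq : (Int × Int) × (Int × Int)) : Int × List Int :=
  if PySem.Int.mod pq.2.1 2 = 1 ∧ pq.1.1 = pq.2.1 - 1 then
    (acc.1 + 1, acc.2 ++ [pq.1.2 * step, pq.2.2 * step])
  else acc

def pred_to_count_alt (preds : List Int) (step : Int) : Int × List Int :=
  let runs := pvRuns preds
  (runs.zip runs.tail).foldl (pvPairStep step) (0, [])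

-- ===== PRECONDITION & SPEC =====
def Spec_pred_to_count (preds : List Int) (step : Int) (out : Int × List Int) : Prop := out = pred_to_count_alt preds step
instance (preds : List Int) (step : Int) (out : Int × List Int) : Decidable (Spec_pred_to_count preds step out) := by unfold Spec_pred_to_count; infer_instance

-- ===== CLAIM (what is proved, stated in full; the proofs are below) =====
def Claim_equal_pred_to_count : Prop := ∀ (preds : List Int) (step : Int), Dom_pred_to_count preds step → Spec_pred_to_count preds step (pred_to_count preds step)

-- ===== LEMMAS AND PROOFS =====

-- B's second pass as a function of an arbitrary run list
def pairsFold (step : Int) (runs : List (Int × Int)) : Int × List Int :=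
  (runs.zip runs.tail).foldl (pvPairStep step) (0, [])

lemma zip_tail_append (runs : List (Int × Int)) (r : Int × Int) (h : runs ≠ []) :
    (runs ++ [r]).zip (runs ++ [r]).tail = runs.zip runs.tail ++ [(runs.getLast h, r)] := by
  induction runs with
  | nil => simp at h
  | cons a t ih =>
    cases t with
    | nil => simp
    | cons b t' =>
      have := ih (by simp)
      simp only [List.cons_append, List.zip_cons_cons, List.tail_cons] at *
      simp [this, List.getLast]

lemma pairsFold_append (step : Int) (runs : List (Int × Int)) (r : Int × Int) (h : runs ≠ []) :
    pairsFold step (runs ++ [r]) = pvPairStep step (pairsFold step runs) (runs.getLast h, r) := by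
  unfold pairsFold
  rw [zip_tail_append runs r h, List.foldl_append]
  simp

lemma pyGetD_append_length (pre xs : List Int) (x : Int) :
    PySem.List.pyGetD (pre ++ x :: xs) ((pre.length : Int)) 0 = x := by
  have hlt : pre.length < (pre ++ x :: xs).length := by simp
  rw [show ((pre.length : Int)) = ((pre.length : Nat) : Int) from rfl,
      PySem.List.pyGetD_natCast]
  simp [List.getD]

lemma main_loop (preds : List Int) (step : Int) :
    ∀ (xs pre : List Int) (count : Int) (reps : List Int) (states : List Int)
      (prevStart : Int) (runs : List (Int × Int)),
      preds = pre ++ xs →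
      (states = [] → count = 0 ∧ reps = [] ∧ runs = [] ∧ prevStart = 0 ∧
        (PySem.List.pyGetD preds 0 0 = -1 ∨ pre = [])) →
      (∀ v, states.head? = some v → ∃ hr : runs ≠ [],
        runs.getLast hr = (v, prevStart) ∧ PySem.List.pyGetD preds prevStart 0 = v ∧
        (count, reps) = pairsFold step runs) →
      (((PySem.List.enumerate xs (pre.length : Int)).foldl (pvStepA preds step)
          (count, reps, states, prevStart)).1,
       ((PySem.List.enumerate xs (pre.length : Int)).foldl (pvStepA preds step)
          (count, reps, states, prevStart)).2.1) =
        pairsFold step ((PySem.List.enumerate xs (pre.length : Int)).foldl pvStepB runs) := by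
  intro xs
  induction xs with
  | nil =>
    intro pre count reps states prevStart runs hpre hemp hne
    cases states with
    | nil =>
      obtain ⟨h1, h2, h3, _, _⟩ := hemp rfl
      simp [PySem.List.enumerate_nil, h1, h2, h3, pairsFold]
    | cons v t =>
      obtain ⟨hr, _, _, heq⟩ := hne v rfl
      simp [PySem.List.enumerate_nil, ← heq]
  | cons x xs ih =>
    intro pre count reps states prevStart runs hpre hemp hne
    rw [PySem.List.enumerate_cons]
    simp only [List.foldl_cons]
    have hlen : ((pre ++ [x]).length : Int) = (pre.length : Int) + 1 := by
      simp
    by_cases hx : x = -1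
    · have hA : pvStepA preds step (count, reps, states, prevStart) ((pre.length : Int), x)
          = (count, reps, states, prevStart) := by simp [pvStepA, hx]
      have hB : pvStepB runs ((pre.length : Int), x) = runs := by simp [pvStepB, hx]
      rw [hA, hB]
      have := ih (pre ++ [x]) count reps states prevStart runs (by simp [hpre])
        (by intro hs
            obtain ⟨h1, h2, h3, h4, h5⟩ := hemp hs
            refine ⟨h1, h2, h3, h4, Or.inl ?_⟩
            rcases h5 with h5 | h5
            · exact h5
            · subst h5; simp [hpre, hx, PySem.List.pyGetD_ofNat']) hne
      rw [hlen] at this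
      exact this
    · cases states with
      | nil =>
        obtain ⟨h1, h2, h3, h4, h5⟩ := hemp rfl
        subst h1 h2 h3 h4
        have hA : pvStepA preds step (0, [], [], 0) ((pre.length : Int), x)
            = (0, [], [x], (pre.length : Int)) := by
          rcases h5 with h5 | h5
          · simp [pvStepA, hx, h5]
          · subst h5
            simp [pvStepA, hx, hpre, PySem.List.pyGetD_ofNat']
        have hB : pvStepB [] ((pre.length : Int), x) = [(x, (pre.length : Int))] := by
          simp [pvStepB, hx]
        rw [hA, hB]
        have := ih (pre ++ [x]) 0 [] [x] (pre.length : Int) [(x, (pre.length : Int))]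
          (by simp [hpre])
          (by intro h; cases h)
          (by intro w hw
              simp only [List.head?_cons, Option.some.injEq] at hw
              subst hw
              refine ⟨by simp, by simp, ?_, by simp [pairsFold]⟩
              rw [hpre]
              exact pyGetD_append_length pre xs x)
        rw [hlen] at this
        exact this
      | cons v t =>
        obtain ⟨hr, hlast, hget, heq⟩ := hne v rfl
        have hlast? : runs.getLast? = some (v, prevStart) := by
          rw [List.getLast?_eq_some_getLast hr, hlast]
        by_cases hxv : x = v
        · subst hxv
          have hA : pvStepA preds step (count, reps, x :: t, prevStart) ((pre.length : Int), x)
              = (count, reps, x :: x :: t, prevStart) := by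
            simp [pvStepA, hx, hget]
          have hB : pvStepB runs ((pre.length : Int), x) = runs := by
            simp [pvStepB, hx, hlast?, hr]
          rw [hA, hB]
          have := ih (pre ++ [x]) count reps (x :: x :: t) prevStart runs (by simp [hpre])
            (by intro h; cases h)
            (by intro w hw
                simp only [List.head?_cons, Option.some.injEq] at hw
                subst hw
                exact ⟨hr, hlast, hget, heq⟩)
          rw [hlen] at this
          exact this
        · by_cases hc : x % 2 = 1 ∧ v = x - 1
          · have hA : pvStepA preds step (count, reps, v :: t, prevStart) ((pre.length : Int), x)
                = (count + 1, reps ++ [prevStart * step, (pre.length : Int) * step],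
                   x :: v :: t, (pre.length : Int)) := by
              simp [pvStepA, hx, hget, hc.1, hc.2]
              omega
            have hB : pvStepB runs ((pre.length : Int), x) = runs ++ [(x, (pre.length : Int))] := by
              simp [pvStepB, hx, hlast?, Ne.symm hxv]
            have heq' : (count + 1, reps ++ [prevStart * step, (pre.length : Int) * step])
                = pairsFold step (runs ++ [(x, (pre.length : Int))]) := by
              rw [pairsFold_append step runs _ hr, hlast, ← heq]
              simp [pvPairStep, hc.1, hc.2]
            rw [hA, hB]
            have := ih (pre ++ [x]) (count + 1)
              (reps ++ [prevStart * step, (pre.length : Int) * step]) (x :: v :: t)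
              (pre.length : Int) (runs ++ [(x, (pre.length : Int))]) (by simp [hpre])
              (by intro h; cases h)
              (by intro w hw
                  simp only [List.head?_cons, Option.some.injEq] at hw
                  subst hw
                  refine ⟨by simp, by simp, ?_, heq'⟩
                  rw [hpre]
                  exact pyGetD_append_length pre xs x)
            rw [hlen] at this
            exact this
          · have hA : pvStepA preds step (count, reps, v :: t, prevStart) ((pre.length : Int), x)
                = (count, reps, x :: v :: t, (pre.length : Int)) := by
              simp [pvStepA, hx, hget, hxv, Ne.symm hxv]
              rw [if_neg hc]
              exact ⟨rfl, rfl⟩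
            have hB : pvStepB runs ((pre.length : Int), x) = runs ++ [(x, (pre.length : Int))] := by
              simp [pvStepB, hx, hlast?, Ne.symm hxv]
            have heq' : (count, reps) = pairsFold step (runs ++ [(x, (pre.length : Int))]) := by
              rw [pairsFold_append step runs _ hr, hlast, ← heq]
              simp [pvPairStep, hc]
            rw [hA, hB]
            have := ih (pre ++ [x]) count reps (x :: v :: t)
              (pre.length : Int) (runs ++ [(x, (pre.length : Int))]) (by simp [hpre])
              (by intro h; cases h)
              (by intro w hw
                  simp only [List.head?_cons, Option.some.injEq] at hw
                  subst hw
                  refine ⟨by simp, by simp, ?_, heq'⟩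
                  rw [hpre]
                  exact pyGetD_append_length pre xs x)
            rw [hlen] at this
            exact this

-- ===== VERDICT (by name: the statement is the Claim_ definition above) =====
theorem pred_to_count_spec : Claim_equal_pred_to_count := by
  intro preds step _
  unfold Spec_pred_to_count pred_to_count pred_to_count_alt pvRuns
  have := main_loop preds step preds [] 0 [] [] 0 [] (by simp)
    (fun _ => ⟨rfl, rfl, rfl, rfl, Or.inr rfl⟩)
    (by intro v hv; simp at hv)
  simpa [pairsFold] using this
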